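-- pv_equiv track=rewrite | github.com/fran-bl/AOC24 | day_20/Main.py | part_2
-- ===== SOURCE A (Python) =====
-- def heuristic(a, b):
--     return abs(a[0] - b[0]) + abs(a[1] - b[1])
--
-- def part_2(path):
--     count = 0
--
--     for cell in path:
--         for di in range(-20, 21):
--             for dj in range(-20 + abs(di), 21 - abs(di)):
--                 hop = (cell[0] + di, cell[1] + dj)
--                 if hop in path:
--                     if path[cell] - path[hop] - heuristic(cell, hop) >= 100:
--                         count += 1
--
--     return count
-- ===== SOURCE B (Python) =====
-- def part_2(path):
--     count = 0
--     items = list(path.items())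
--     for (c, vc) in items:
--         for (h, vh) in items:
--             d = abs(c[0] - h[0]) + abs(c[1] - h[1])
--             if d <= 20 and vc - vh - d >= 100:
--                 count += 1
--     return count
-- ===== Notes on version B (the rewrite author's own statement) =====
-- stated objective: simpler
-- what changed: Replaces the enumeration of all ~441 Manhattan-ball offsets around each cell plus dict-membership tests by a direct double loop over the path cells themselves, filtering pairs by Manhattan distance <= 20.
import Mathlib
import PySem

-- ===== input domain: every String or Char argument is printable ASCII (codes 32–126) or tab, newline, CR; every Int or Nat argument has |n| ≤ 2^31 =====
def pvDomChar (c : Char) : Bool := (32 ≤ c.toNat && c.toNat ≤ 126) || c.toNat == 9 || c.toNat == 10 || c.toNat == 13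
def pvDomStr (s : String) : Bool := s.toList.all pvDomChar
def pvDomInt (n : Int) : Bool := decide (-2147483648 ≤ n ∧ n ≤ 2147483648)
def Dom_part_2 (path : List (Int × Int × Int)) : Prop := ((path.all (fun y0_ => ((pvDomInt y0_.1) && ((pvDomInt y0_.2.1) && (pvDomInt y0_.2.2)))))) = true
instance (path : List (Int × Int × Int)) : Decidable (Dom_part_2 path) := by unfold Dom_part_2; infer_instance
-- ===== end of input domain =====

-- B replaces A's enumeration of all ~441 Manhattan-ball offsets around each cell (plus dict
-- membership test) by a direct double loop over the path cells filtered by distance; same value.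

-- ===== PORT A =====
-- the dict path : {(i,j): v} is the association list of triples (i, j, v); first-match lookup
def plookup (path : List (Int × Int × Int)) (k : Int × Int) : Option Int :=
  match path with
  | [] => none
  | e :: t => if (e.1, e.2.1) = k then some e.2.2 else plookup t k

def heuristicL (a b : Int × Int) : Int := |a.1 - b.1| + |a.2 - b.2|

def part_2 (path : List (Int × Int × Int)) : Int :=
  path.foldl (fun count cell =>
    (PySem.List.pyRange (-20) 21 1).foldl (fun count di =>
      (PySem.List.pyRange (-20 + |di|) (21 - |di|) 1).foldl (fun count dj =>
        let hop : Int × Int := (cell.1 + di, cell.2.1 + dj)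
        match plookup path hop with
        | none => count
        | some vh =>
          match plookup path (cell.1, cell.2.1) with
          | none => count   -- unreachable: cell is a key of path (path[cell] never raises)
          | some vc =>
            if vc - vh - heuristicL (cell.1, cell.2.1) hop ≥ 100 then count + 1 else count)
        count) count) 0

-- ===== PORT B =====
def part_2_alt (path : List (Int × Int × Int)) : Int :=
  path.foldl (fun count c =>
    path.foldl (fun count h =>
      let d := |c.1 - h.1| + |c.2.1 - h.2.1|
      if d ≤ 20 ∧ c.2.2 - h.2.2 - d ≥ 100 then count + 1 else count) count) 0

-- ===== PRECONDITION & SPEC =====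
-- Pre_ excludes association lists with duplicate keys (i, j): those do not represent any Python
-- dict (dict keys are unique; building one collapses duplicates), so the input is ambiguous there.
def Pre_part_2 (path : List (Int × Int × Int)) : Prop :=
  (path.map (fun e => (e.1, e.2.1))).Nodup

instance (path : List (Int × Int × Int)) : Decidable (Pre_part_2 path) := by
  unfold Pre_part_2; infer_instance

def pvWitness_part_2 : (List (Int × Int × Int)) := [(0, 0, 300), (1, 1, 0)]

def Spec_part_2 (path : List (Int × Int × Int)) (out : Int) : Prop := out = part_2_alt path
instance (path : List (Int × Int × Int)) (out : Int) : Decidable (Spec_part_2 path out) := by unfold Spec_part_2; infer_instance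

-- ===== CLAIM (what is proved, stated in full; the proofs are below) =====
def Claim_equal_part_2 : Prop := ∀ (path : List (Int × Int × Int)), Dom_part_2 path → Pre_part_2 path → Spec_part_2 path (part_2 path)

-- ===== LEMMAS AND PROOFS =====

-- the Manhattan ball of radius 20 enumerated by A's two inner loops
def ball : List (Int × Int) :=
  (PySem.List.pyRange (-20) 21 1).flatMap (fun di =>
    (PySem.List.pyRange (-20 + |di|) (21 - |di|) 1).map (fun dj => (di, dj)))

def aTerm (path : List (Int × Int × Int)) (cell : Int × Int × Int) (o : Int × Int) : Int :=
  match plookup path (cell.1 + o.1, cell.2.1 + o.2) with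
  | none => 0
  | some vh =>
    match plookup path (cell.1, cell.2.1) with
    | none => 0
    | some vc =>
      if vc - vh - heuristicL (cell.1, cell.2.1) (cell.1 + o.1, cell.2.1 + o.2) ≥ 100 then 1 else 0

def bTerm (c h : Int × Int × Int) : Int :=
  if (|c.1 - h.1| + |c.2.1 - h.2.1|) ≤ 20 ∧ c.2.2 - h.2.2 - (|c.1 - h.1| + |c.2.1 - h.2.1|) ≥ 100
  then 1 else 0

theorem foldl_eq_add_sum {α : Type} (l : List α) (g : α → Int) (f : Int → α → Int)
    (h : ∀ c x, f c x = c + g x) (a : Int) : l.foldl f a = a + (l.map g).sum := by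
  induction l generalizing a with
  | nil => simp
  | cons x t ih => rw [List.foldl_cons, h, ih, List.map_cons, List.sum_cons]; ring

theorem sum_flatMap' {A : Type} (l : List A) (f : A → List Int) :
    (l.flatMap f).sum = (l.map (fun x => (f x).sum)).sum := by
  induction l with
  | nil => simp
  | cons x t ih => simp [List.flatMap_cons, ih]

theorem part_2_eq_sum (path : List (Int × Int × Int)) :
    part_2 path = (path.map (fun cell => (ball.map (aTerm path cell)).sum)).sum := by
  unfold part_2
  rw [foldl_eq_add_sum _ (fun cell => (ball.map (aTerm path cell)).sum), zero_add]
  intro c cell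
  rw [foldl_eq_add_sum _ (fun di => (((PySem.List.pyRange (-20 + |di|) (21 - |di|) 1)).map
        (fun dj => aTerm path cell (di, dj))).sum)]
  · unfold ball
    rw [List.map_flatMap]
    rw [sum_flatMap']
    simp [List.map_map, Function.comp_def]
  · intro c di
    rw [foldl_eq_add_sum _ (fun dj => aTerm path cell (di, dj))]
    intro c dj
    unfold aTerm
    rcases hh : plookup path (cell.1 + di, cell.2.1 + dj) with _ | vh
    · simp only [hh]; ring
    · rcases hc : plookup path (cell.1, cell.2.1) with _ | vc
      · simp only [hh]; ring
      · simp only [hh, hc]; split <;> ring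

theorem part_2_alt_eq_sum (path : List (Int × Int × Int)) :
    part_2_alt path = (path.map (fun c => (path.map (bTerm c)).sum)).sum := by
  unfold part_2_alt
  rw [foldl_eq_add_sum _ (fun c => (path.map (bTerm c)).sum), zero_add]
  intro a c
  rw [foldl_eq_add_sum _ (bTerm c)]
  intro a h
  unfold bTerm
  dsimp only
  split <;> ring

theorem mem_ball (o : Int × Int) : o ∈ ball ↔ |o.1| + |o.2| ≤ 20 := by
  unfold ball
  rw [List.mem_flatMap]
  constructor
  · rintro ⟨di, hdi, hmem⟩
    rw [List.mem_map] at hmem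
    obtain ⟨dj, hdj, rfl⟩ := hmem
    rw [PySem.List.mem_pyRange_one] at hdi hdj
    simp only [Int.abs_eq_natAbs] at *
    omega
  · intro h
    refine ⟨o.1, ?_, ?_⟩
    · rw [PySem.List.mem_pyRange_one]
      simp only [Int.abs_eq_natAbs] at *; omega
    · rw [List.mem_map]
      refine ⟨o.2, ?_, rfl⟩
      rw [PySem.List.mem_pyRange_one]
      simp only [Int.abs_eq_natAbs] at *; omega

theorem nodup_ball : ball.Nodup := by
  unfold ball
  rw [List.nodup_flatMap]
  constructor
  · intro di _
    exact (PySem.List.nodup_pyRange_one _ _).map (fun a b h => by simpa using h)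
  · refine List.Pairwise.imp ?_ (PySem.List.pairwise_lt_pyRange_one (-20) 21)
    intro a b hab x hx hy
    rw [List.mem_map] at hx hy
    obtain ⟨da, _, rfl⟩ := hx
    obtain ⟨db, _, h⟩ := hy
    injection h with h1 h2
    omega

theorem lookup_self (path : List (Int × Int × Int)) (h : Pre_part_2 path)
    (e : Int × Int × Int) (he : e ∈ path) : plookup path (e.1, e.2.1) = some e.2.2 := by
  induction path with
  | nil => cases he
  | cons f t ih =>
    unfold Pre_part_2 at h
    rw [List.map_cons, List.nodup_cons] at h
    rcases List.mem_cons.mp he with rfl | he'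
    · simp [plookup]
    · unfold plookup
      split
      · rename_i heq
        exact absurd (heq ▸ List.mem_map_of_mem he') h.1
      · exact ih h.2 he'

theorem lookup_none (t : List (Int × Int × Int)) (k : Int × Int)
    (hk : k ∉ t.map (fun e => (e.1, e.2.1))) : plookup t k = none := by
  induction t with
  | nil => rfl
  | cons g s ih =>
    rw [List.map_cons, List.mem_cons] at hk
    push Not at hk
    unfold plookup
    rw [if_neg (fun he => hk.1 he.symm), ih hk.2]

theorem sum_map_add' {α : Type} (l : List α) (f g : α → Int) :
    (l.map (fun x => f x + g x)).sum = (l.map f).sum + (l.map g).sum := by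
  induction l with
  | nil => simp
  | cons x t ih => simp only [List.map_cons, List.sum_cons, ih]; ring

theorem lookup_sum (path : List (Int × Int × Int)) (h : Pre_part_2 path)
    (k : Int × Int) (C : Int → Prop) [DecidablePred C] :
    (path.map (fun f => if (f.1, f.2.1) = k ∧ C f.2.2 then (1 : Int) else 0)).sum
      = match plookup path k with
        | some v => if C v then (1 : Int) else 0
        | none => 0 := by
  induction path with
  | nil => simp [plookup]
  | cons f t ih =>
    unfold Pre_part_2 at h
    rw [List.map_cons, List.nodup_cons] at h
    rw [List.map_cons, List.sum_cons, ih h.2]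
    simp only [plookup]
    by_cases hk : (f.1, f.2.1) = k
    · rw [if_pos hk]
      have ht : plookup t k = none := lookup_none t k (hk ▸ h.1)
      rw [ht]
      by_cases hc : C f.2.2 <;> simp [hk, hc]
    · rw [if_neg hk]
      simp [hk]

theorem sum_comm_list {α β : Type} (l1 : List α) (l2 : List β) (g : α → β → Int) :
    (l1.map (fun a => (l2.map (g a)).sum)).sum
      = (l2.map (fun b => (l1.map (fun a => g a b)).sum)).sum := by
  induction l1 with
  | nil => simp
  | cons x t ih =>
    rw [List.map_cons, List.sum_cons, ih]
    have : (l2.map (fun b => ((x :: t).map (fun a => g a b)).sum)).sum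
        = (l2.map (fun b => g x b + (t.map (fun a => g a b)).sum)).sum := by
      simp [List.map_cons]
    rw [this, sum_map_add' l2 (fun b => g x b) (fun b => (t.map (fun a => g a b)).sum)]

theorem sum_ite_count {α : Type} [DecidableEq α] (L : List α) (hL : L.Nodup) (o0 : α)
    (D : Prop) [Decidable D] :
    (L.map (fun o => if o = o0 ∧ D then (1 : Int) else 0)).sum
      = if o0 ∈ L ∧ D then 1 else 0 := by
  induction L with
  | nil => simp
  | cons x t ih =>
    rw [List.nodup_cons] at hL
    rw [List.map_cons, List.sum_cons, ih hL.2]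
    by_cases hx : x = o0
    · subst hx
      have : x ∉ t := hL.1
      by_cases hD : D <;> simp [hD, this]
    · by_cases hm : o0 ∈ t <;> by_cases hD : D <;>
        simp [hx, hm, hD, List.mem_cons, Ne.symm hx]

theorem aTerm_eq (path : List (Int × Int × Int)) (h : Pre_part_2 path)
    (c : Int × Int × Int) (hc : c ∈ path) (o : Int × Int) :
    aTerm path c o = (path.map (fun f =>
      if (f.1, f.2.1) = (c.1 + o.1, c.2.1 + o.2) ∧ c.2.2 - f.2.2 - (|o.1| + |o.2|) ≥ 100
      then (1 : Int) else 0)).sum := by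
  rw [lookup_sum path h (c.1 + o.1, c.2.1 + o.2) (fun v => c.2.2 - v - (|o.1| + |o.2|) ≥ 100)]
  unfold aTerm
  cases plookup path (c.1 + o.1, c.2.1 + o.2) with
  | none => rfl
  | some vh =>
    rw [lookup_self path h c hc]
    have harith : heuristicL (c.1, c.2.1) (c.1 + o.1, c.2.1 + o.2) = |o.1| + |o.2| := by
      unfold heuristicL
      dsimp only
      rw [show c.1 - (c.1 + o.1) = -o.1 by ring, show c.2.1 - (c.2.1 + o.2) = -o.2 by ring,
        abs_neg, abs_neg]
    rw [harith]

theorem inner_eq (path : List (Int × Int × Int)) (h : Pre_part_2 path)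
    (c : Int × Int × Int) (hc : c ∈ path) :
    (ball.map (aTerm path c)).sum = (path.map (bTerm c)).sum := by
  have h1 : (ball.map (aTerm path c)).sum
      = (ball.map (fun o => (path.map (fun f =>
          if (f.1, f.2.1) = (c.1 + o.1, c.2.1 + o.2) ∧ c.2.2 - f.2.2 - (|o.1| + |o.2|) ≥ 100
          then (1 : Int) else 0)).sum)).sum := by
    exact congrArg List.sum (List.map_congr_left fun o _ => aTerm_eq path h c hc o)
  rw [h1, sum_comm_list]
  refine congrArg List.sum (List.map_congr_left fun f _ => ?_)
  have hcond : ∀ o : Int × Int,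
      ((f.1, f.2.1) = (c.1 + o.1, c.2.1 + o.2) ∧ c.2.2 - f.2.2 - (|o.1| + |o.2|) ≥ 100)
        ↔ (o = (f.1 - c.1, f.2.1 - c.2.1) ∧
            c.2.2 - f.2.2 - (|c.1 - f.1| + |c.2.1 - f.2.1|) ≥ 100) := by
    intro o
    constructor
    · rintro ⟨hk, hC⟩
      rw [Prod.ext_iff] at hk
      obtain ⟨h1', h2'⟩ := hk
      have ho1 : o.1 = f.1 - c.1 := by omega
      have ho2 : o.2 = f.2.1 - c.2.1 := by omega
      refine ⟨Prod.ext ho1 ho2, ?_⟩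
      rw [ho1, ho2, abs_sub_comm f.1 c.1, abs_sub_comm f.2.1 c.2.1] at hC
      exact hC
    · rintro ⟨rfl, hC⟩
      refine ⟨by dsimp only; rw [Prod.ext_iff]; constructor <;> dsimp only <;> ring, ?_⟩
      dsimp only
      rw [abs_sub_comm c.1 f.1, abs_sub_comm c.2.1 f.2.1] at hC
      exact hC
  have hfun : (fun o => if (f.1, f.2.1) = (c.1 + o.1, c.2.1 + o.2) ∧
        c.2.2 - f.2.2 - (|o.1| + |o.2|) ≥ 100 then (1 : Int) else 0)
      = (fun o => if o = (f.1 - c.1, f.2.1 - c.2.1) ∧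
        c.2.2 - f.2.2 - (|c.1 - f.1| + |c.2.1 - f.2.1|) ≥ 100 then (1 : Int) else 0) := by
    funext o
    exact if_congr (hcond o) rfl rfl
  rw [hfun, sum_ite_count ball nodup_ball _ _]
  unfold bTerm
  have hb : (f.1 - c.1, f.2.1 - c.2.1) ∈ ball ↔ |c.1 - f.1| + |c.2.1 - f.2.1| ≤ 20 := by
    rw [mem_ball]
    dsimp only
    rw [abs_sub_comm f.1 c.1, abs_sub_comm f.2.1 c.2.1]
  simp only [hb]

-- ===== VERDICT (by name: the statement is the Claim_ definition above) =====
theorem part_2_spec : Claim_equal_part_2 := by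
  intro path _hdom hpre
  unfold Spec_part_2
  rw [part_2_eq_sum, part_2_alt_eq_sum]
  exact congrArg List.sum (List.map_congr_left fun c hc => inner_eq path hpre c hc)
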